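-- pv_equiv track=rewrite | github.com/DHRUV6029/Google-Msft_InterviewQues | .idx/consecutive_sequenmce_sum.py | solution
-- ===== SOURCE A (Python) =====
-- def solution(arr, target):
--     arr.sort()
--
--     l = 0
--     r = 0
--     cur_sum = 0
--     while r < len(arr):
--         if r == 0 or (r > 0 and arr[r] - arr[r-1]==1):
--             cur_sum+=arr[r]
--         else:
--             l = r #shift l tp r
--             cur_sum = arr[r]
--
--
--         while l <= r and cur_sum > target:
--             cur_sum-=arr[l]
--             l+=1
--
--         if cur_sum == target:
--             return True
--         r+=1
--     return False
-- ===== SOURCE B (Python) =====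
-- def solution(arr, target):
--     arr.sort()
--     for run in _runs(arr):
--         if _scan(run, target):
--             return True
--     return False
--
--
-- def _runs(arr):
--     """Split the sorted list into maximal runs of consecutive (+1) values."""
--     if not arr:
--         return []
--     runs = []
--     cur = [arr[0]]
--     for v in arr[1:]:
--         if v - cur[-1] == 1:
--             cur.append(v)
--         else:
--             runs.append(cur)
--             cur = [v]
--     runs.append(cur)
--     return runs
--
--
-- def _scan(run, target):
--     """Sliding window (shrink only while over target) over one run."""
--     window = []
--     s = 0
--     for v in run:
--         window.append(v)
--         s += v
--         while window and s > target:
--             s -= window.pop(0)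
--         if s == target:
--             return True
--     return False
-- ===== Notes on version B (the rewrite author's own statement) =====
-- stated objective: alternative
-- what changed: Replaces A's single interleaved index-based loop (l/r pointers with run-break detection inline) by a two-phase decomposition: first segment the sorted list into maximal consecutive-difference-1 runs, then run an independent explicit-window sliding scan over each run.
import Mathlib
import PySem

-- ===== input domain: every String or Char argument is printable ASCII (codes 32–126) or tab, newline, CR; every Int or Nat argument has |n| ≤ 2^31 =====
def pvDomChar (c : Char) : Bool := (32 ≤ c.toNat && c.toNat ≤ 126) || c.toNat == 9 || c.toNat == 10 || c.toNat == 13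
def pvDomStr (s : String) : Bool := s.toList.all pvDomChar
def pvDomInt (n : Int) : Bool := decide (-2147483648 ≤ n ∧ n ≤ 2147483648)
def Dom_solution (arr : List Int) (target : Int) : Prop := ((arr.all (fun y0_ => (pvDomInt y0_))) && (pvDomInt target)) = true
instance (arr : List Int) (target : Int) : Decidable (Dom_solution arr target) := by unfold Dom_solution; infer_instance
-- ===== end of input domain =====

-- B replaces A's single interleaved two-pointer loop by a segment-into-runs-then-scan-each-run
-- decomposition (objective: alternative). Both Pythons sort `arr` in place; the theorems are
-- about the return value (B performs the same mutation).

-- ===== PORT A =====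
-- inner `while l <= r and cur_sum > target` loop of A
def shrinkA (xs : List Int) (target : Int) (r : Nat) (l : Nat) (s : Int) : Nat × Int :=
  if l ≤ r ∧ s > target then shrinkA xs target r (l + 1) (s - xs.getD l 0)
  else (l, s)
termination_by r + 1 - l
decreasing_by omega

-- outer `while r < len(arr)` loop of A, state (l, r, cur_sum)
def loopA (xs : List Int) (target : Int) (l r : Nat) (s : Int) : Bool :=
  if r < xs.length then
    let ls :=
      if r = 0 ∨ (0 < r ∧ xs.getD r 0 - xs.getD (r - 1) 0 = 1) then (l, s + xs.getD r 0)
      else (r, xs.getD r 0)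
    let ls2 := shrinkA xs target r ls.1 ls.2
    if ls2.2 = target then true
    else loopA xs target ls2.1 (r + 1) ls2.2
  else false
termination_by xs.length - r
decreasing_by omega

def solution (arr : List Int) (target : Int) : Bool :=
  loopA (PySem.List.sorted arr (fun x => x) false) target 0 0 0

-- ===== PORT B =====
-- `while window and s > target: s -= window.pop(0)` of B's _scan
def shrinkB (target : Int) : List Int → Int → List Int × Int
  | [], s => ([], s)
  | v :: w, s => if s > target then shrinkB target w (s - v) else (v :: w, s)

-- the `for v in run` loop of B's _scan, state (window, s)
def scanGo (target : Int) (w : List Int) (s : Int) : List Int → Bool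
  | [] => false
  | v :: rest =>
      let ws := shrinkB target (w ++ [v]) (s + v)
      if ws.2 = target then true else scanGo target ws.1 ws.2 rest

def scanRun (run : List Int) (target : Int) : Bool := scanGo target [] 0 run

-- the `for v in arr[1:]` loop of B's _runs, state (runs, cur)
def runsGo (runs : List (List Int)) (cur : List Int) : List Int → List (List Int)
  | [] => runs ++ [cur]
  | v :: rest =>
      if v - cur.getLast?.getD 0 = 1 then runsGo runs (cur ++ [v]) rest
      else runsGo (runs ++ [cur]) [v] rest

def runsOf : List Int → List (List Int)
  | [] => []
  | x :: rest => runsGo [] [x] rest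

def solution_alt (arr : List Int) (target : Int) : Bool :=
  (runsOf (PySem.List.sorted arr (fun x => x) false)).any (fun run => scanRun run target)

-- ===== PRECONDITION & SPEC =====
def Spec_solution (arr : List Int) (target : Int) (out : Bool) : Prop := out = solution_alt arr target
instance (arr : List Int) (target : Int) (out : Bool) : Decidable (Spec_solution arr target out) := by unfold Spec_solution; infer_instance

-- ===== CLAIM (what is proved, stated in full; the proofs are below) =====
def Claim_equal_solution : Prop := ∀ (arr : List Int) (target : Int), Dom_solution arr target → Spec_solution arr target (solution arr target)

-- ===== LEMMAS AND PROOFS =====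

-- proof-side list-state reformulation of A's outer loop
def loop2 (t : Int) (prev : Option Int) (w : List Int) (s : Int) : List Int → Bool
  | [] => false
  | v :: rest =>
      let ws1 : List Int × Int :=
        match prev with
        | none => (w ++ [v], s + v)
        | some p => if v - p = 1 then (w ++ [v], s + v) else ([v], v)
      let ws2 := shrinkB t ws1.1 ws1.2
      if ws2.2 = t then true else loop2 t (some v) ws2.1 ws2.2 rest

-- split off the maximal consecutive (+1) chain continuing `last`
def splitChain (last : Int) : List Int → List Int × List Int
  | [] => ([], [])
  | v :: rest =>
      if v - last = 1 then
        let cr := splitChain v rest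
        (v :: cr.1, cr.2)
      else ([], v :: rest)

theorem win_cons (xs : List Int) (l r : Nat) (hl : l ≤ r) (hr : r < xs.length) :
    (xs.drop l).take (r + 1 - l) = xs.getD l 0 :: (xs.drop (l + 1)).take (r - l) := by
  have hln : l < xs.length := by omega
  rw [List.drop_eq_getElem_cons hln]
  have : r + 1 - l = (r - l) + 1 := by omega
  rw [this, List.take_succ_cons, List.getD_eq_getElem _ _ hln]

theorem win_snoc (xs : List Int) (l r : Nat) (hl : l ≤ r) (hr : r < xs.length) :
    (xs.drop l).take (r - l) ++ [xs.getD r 0] = (xs.drop l).take (r + 1 - l) := by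
  have h1 : r + 1 - l = (r - l) + 1 := by omega
  rw [h1, List.take_add_one]
  have h2 : (xs.drop l)[r - l]? = some xs[r] := by
    rw [List.getElem?_drop]
    have : l + (r - l) = r := by omega
    rw [this, List.getElem?_eq_getElem hr]
  rw [h2, List.getD_eq_getElem _ _ hr]
  rfl

theorem shrink_bridge (xs : List Int) (t : Int) (r : Nat) (hr : r < xs.length) :
    ∀ l s, l ≤ r + 1 →
      l ≤ (shrinkA xs t r l s).1 ∧ (shrinkA xs t r l s).1 ≤ r + 1 ∧
      shrinkB t ((xs.drop l).take (r + 1 - l)) s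
        = ((xs.drop (shrinkA xs t r l s).1).take (r + 1 - (shrinkA xs t r l s).1),
           (shrinkA xs t r l s).2) := by
  intro l s hl
  induction l, s using shrinkA.induct xs t r with
  | case1 l s h ih =>
      obtain ⟨hlr, hst⟩ := h
      rw [shrinkA, if_pos ⟨hlr, hst⟩]
      have hb := ih (by omega)
      refine ⟨by omega, hb.2.1, ?_⟩
      rw [win_cons xs l r hlr hr, shrinkB, if_pos hst]
      have h21 : r + 1 - (l + 1) = r - l := by omega
      rw [h21] at hb
      exact hb.2.2
  | case2 l s h =>
      rw [shrinkA, if_neg h]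
      refine ⟨le_refl _, hl, ?_⟩
      by_cases hlr : l ≤ r
      · have hst : ¬ s > t := fun hc => h ⟨hlr, hc⟩
        rw [win_cons xs l r hlr hr, shrinkB, if_neg hst, ← win_cons xs l r hlr hr]
      · have : l = r + 1 := by omega
        subst this
        simp [shrinkB]

theorem loopA_eq_loop2 (xs : List Int) (t : Int) :
    ∀ k r l s, xs.length - r ≤ k → l ≤ r →
      loopA xs t l r s
        = loop2 t (if r = 0 then none else some (xs.getD (r - 1) 0))
            ((xs.drop l).take (r - l)) s (xs.drop r) := by
  intro k
  induction k with
  | zero =>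
      intro r l s hk hl
      have hr : ¬ r < xs.length := by omega
      rw [loopA, if_neg hr, List.drop_eq_nil_of_le (i := r) (by omega)]
      simp only [loop2]
  | succ k ih =>
      intro r l s hk hl
      by_cases hr : r < xs.length
      · rw [loopA, if_pos hr]
        have hdrop : xs.drop r = xs.getD r 0 :: xs.drop (r + 1) := by
          rw [List.drop_eq_getElem_cons hr, List.getD_eq_getElem _ _ hr]
        rw [hdrop]
        simp only [loop2]
        -- align the branch on run continuation
        have hbranch :
            (match (if r = 0 then none else some (xs.getD (r - 1) 0)) with
              | none => ((xs.drop l).take (r - l) ++ [xs.getD r 0], s + xs.getD r 0)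
              | some p => if xs.getD r 0 - p = 1
                  then ((xs.drop l).take (r - l) ++ [xs.getD r 0], s + xs.getD r 0)
                  else ([xs.getD r 0], xs.getD r 0) : List Int × Int)
            = (let ls := if r = 0 ∨ (0 < r ∧ xs.getD r 0 - xs.getD (r - 1) 0 = 1)
                  then (l, s + xs.getD r 0) else (r, xs.getD r 0)
               ((xs.drop ls.1).take (r + 1 - ls.1), ls.2)) := by
          by_cases h0 : r = 0
          · subst h0
            have hl0 : l = 0 := by omega
            subst hl0
            have hw := win_snoc xs 0 0 (le_refl 0) hr
            simp at hw
            simp [hw]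
          · rw [if_neg h0]
            by_cases hc : xs.getD r 0 - xs.getD (r - 1) 0 = 1
            · have : (r = 0 ∨ (0 < r ∧ xs.getD r 0 - xs.getD (r - 1) 0 = 1)) := Or.inr ⟨by omega, hc⟩
              simp only [if_pos hc, if_pos this]
              rw [win_snoc xs l r hl hr]
            · have hnot : ¬ (r = 0 ∨ (0 < r ∧ xs.getD r 0 - xs.getD (r - 1) 0 = 1)) := by
                rintro (h | ⟨_, h⟩) <;> [exact h0 h; exact hc h]
              simp only [if_neg hc, if_neg hnot]
              have : (xs.drop r).take (r + 1 - r) = [xs.getD r 0] := by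
                rw [win_cons xs r r (le_refl r) hr]
                simp
              rw [this]
        simp only [hbranch]
        set ls := if r = 0 ∨ (0 < r ∧ xs.getD r 0 - xs.getD (r - 1) 0 = 1)
            then (l, s + xs.getD r 0) else (r, xs.getD r 0) with hls
        have hls1 : ls.1 ≤ r := by
          rw [hls]; split <;> simp [hl]
        have hb := shrink_bridge xs t r hr ls.1 ls.2 (by omega)
        rw [hb.2.2]
        simp only
        by_cases heq : (shrinkA xs t r ls.1 ls.2).2 = t
        · rw [if_pos heq, if_pos heq]
        · rw [if_neg heq, if_neg heq]
          have := ih (r + 1) (shrinkA xs t r ls.1 ls.2).1 (shrinkA xs t r ls.1 ls.2).2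
            (by omega) (by omega)
          rw [this]
          have hr1 : ¬ r + 1 = 0 := by omega
          rw [if_neg hr1]
          simp only [Nat.add_sub_cancel]
      · rw [loopA, if_neg hr, List.drop_eq_nil_of_le (i := r) (by omega)]
        simp only [loop2]

theorem runsGo_eq :
    ∀ (rest : List Int) (runs : List (List Int)) (cur : List Int), cur ≠ [] →
      runsGo runs cur rest
        = runs ++ (cur ++ (splitChain (cur.getLast?.getD 0) rest).1)
            :: runsOf (splitChain (cur.getLast?.getD 0) rest).2 := by
  intro rest
  induction rest with
  | nil => intro runs cur hc; simp [runsGo, splitChain, runsOf]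
  | cons v rest ih =>
      intro runs cur hc
      rw [runsGo, splitChain]
      by_cases h : v - cur.getLast?.getD 0 = 1
      · rw [if_pos h, if_pos h]
        have hlast : (cur ++ [v]).getLast?.getD 0 = v := by
          simp [List.getLast?_append]
        have := ih runs (cur ++ [v]) (by simp)
        rw [hlast] at this
        rw [this]
        simp
      · rw [if_neg h, if_neg h]
        have := ih (runs ++ [cur]) [v] (by simp)
        simp only [List.getLast?_singleton, Option.getD_some] at this
        rw [this]
        have hrv : runsOf (v :: rest) = ([v] ++ (splitChain v rest).1) :: runsOf (splitChain v rest).2 := by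
          rw [runsOf]
          have := ih [] [v] (by simp)
          simp only [List.getLast?_singleton, Option.getD_some, List.nil_append] at this
          rw [this]
        rw [hrv]
        simp

theorem if_true_or (c : Prop) [Decidable c] (x y : Bool) :
    ((if c then true else x) || y) = if c then true else (x || y) := by
  split <;> simp

theorem loop2_eq_runs (t : Int) :
    ∀ (rest : List Int) (last : Int) (w : List Int) (s : Int),
      loop2 t (some last) w s rest
        = (scanGo t w s (splitChain last rest).1
           || (runsOf (splitChain last rest).2).any (fun run => scanRun run t)) := by
  intro rest
  induction rest with
  | nil => intro last w s; simp [loop2, splitChain, runsOf, scanGo]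
  | cons v rest ih =>
      intro last w s
      rw [loop2, splitChain]
      by_cases h : v - last = 1
      · rw [if_pos h, if_pos h]
        simp only [scanGo]
        rw [if_true_or]
        split
        · rfl
        · exact ih v _ _
      · rw [if_neg h, if_neg h]
        simp only [scanGo]
        have hrv : runsOf (v :: rest) = ([v] ++ (splitChain v rest).1) :: runsOf (splitChain v rest).2 := by
          rw [runsOf, runsGo_eq rest [] [v] (by simp)]
          simp
        rw [hrv]
        simp only [List.any_cons, Bool.false_or]
        have hscan : scanRun ([v] ++ (splitChain v rest).1) t
            = (if (shrinkB t [v] v).2 = t then true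
               else scanGo t (shrinkB t [v] v).1 (shrinkB t [v] v).2 (splitChain v rest).1) := by
          simp [scanRun, scanGo]
        rw [hscan, if_true_or]
        split
        · rfl
        · exact ih v _ _

theorem loop2_top (t : Int) (xs : List Int) :
    loop2 t none [] 0 xs = (runsOf xs).any (fun run => scanRun run t) := by
  cases xs with
  | nil => simp [loop2, runsOf]
  | cons x rest =>
      rw [loop2]
      have hrv : runsOf (x :: rest) = ([x] ++ (splitChain x rest).1) :: runsOf (splitChain x rest).2 := by
        rw [runsOf, runsGo_eq rest [] [x] (by simp)]
        simp
      rw [hrv]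
      simp only [List.any_cons, scanRun]
      have hscan : scanGo t [] 0 ([x] ++ (splitChain x rest).1)
          = (if (shrinkB t [x] x).2 = t then true
             else scanGo t (shrinkB t [x] x).1 (shrinkB t [x] x).2 (splitChain x rest).1) := by
        simp [scanGo]
      rw [hscan, if_true_or]
      simp only [List.nil_append, Int.zero_add]
      split
      · rfl
      · exact loop2_eq_runs t rest x _ _

-- ===== VERDICT (by name: the statement is the Claim_ definition above) =====
theorem solution_spec : Claim_equal_solution := by
  intro arr target _
  unfold Spec_solution solution solution_alt
  set xs := PySem.List.sorted arr (fun x => x) false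
  rw [loopA_eq_loop2 xs target xs.length 0 0 0 (by omega) (le_refl 0)]
  simp only [List.drop_zero]
  exact loop2_top target xs
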